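-- pv_equiv track=rewrite | github.com/amerten/AdventOfCode | 2024/day2/part2.py | safe
-- ===== SOURCE A (Python) =====
-- def safe(l):
--    if l != sorted(l) and l != sorted(l, reverse=True):
--       return 0
--    for i in range(len(l) - 1):
--       d = abs(l[i] - l[i + 1])
--       if d < 1 or d > 3:
--          return 0
--    return 1
-- ===== SOURCE B (Python) =====
-- def safe(l):
--     # One linear pass over adjacent differences: the report is safe iff all
--     # differences lie in [1,3] (strictly increasing) or all in [-3,-1].
--     diffs = [b - a for a, b in zip(l, l[1:])]
--     if all(1 <= d <= 3 for d in diffs) or all(-3 <= d <= -1 for d in diffs):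
--         return 1
--     return 0
-- ===== Notes on version B (the rewrite author's own statement) =====
-- stated objective: faster
-- what changed: Replaces the two sorted() copies plus an index loop by a single linear pass over adjacent differences, checking that they all lie in [1,3] or all in [-3,-1].
import Mathlib
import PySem

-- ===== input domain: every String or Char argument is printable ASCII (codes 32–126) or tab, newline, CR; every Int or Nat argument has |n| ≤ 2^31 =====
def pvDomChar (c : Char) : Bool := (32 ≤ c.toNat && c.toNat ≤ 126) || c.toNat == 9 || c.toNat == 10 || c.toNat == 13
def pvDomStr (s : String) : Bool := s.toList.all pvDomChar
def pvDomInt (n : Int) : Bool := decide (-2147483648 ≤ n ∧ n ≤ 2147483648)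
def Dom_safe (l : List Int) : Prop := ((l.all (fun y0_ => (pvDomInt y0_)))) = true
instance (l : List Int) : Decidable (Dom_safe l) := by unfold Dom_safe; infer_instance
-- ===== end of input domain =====

-- B replaces A's two sorted() copies + index loop by one linear pass over adjacent differences (asymptotically faster).


-- ===== PORT A =====
-- for i in range(len(l)-1): d = abs(l[i]-l[i+1]); if d < 1 or d > 3: return 0   (then: return 1)
def safeLoop (l : List Int) : List Int → Int
  | [] => 1
  | i :: rest =>
    let d := |PySem.List.pyGetD l i 0 - PySem.List.pyGetD l (i + 1) 0|
    if d < 1 ∨ d > 3 then 0 else safeLoop l rest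

def safe (l : List Int) : Int :=
  if l ≠ PySem.List.sorted l (fun x => x) false ∧ l ≠ PySem.List.sorted l (fun x => x) true then 0
  else safeLoop l (PySem.List.pyRange 0 ((l.length : Int) - 1) 1)

-- ===== PORT B =====
def safe_alt (l : List Int) : Int :=
  let diffs := (l.zip (l.drop 1)).map (fun p => p.2 - p.1)   -- zip(l, l[1:])
  if diffs.all (fun d => decide (1 ≤ d ∧ d ≤ 3)) || diffs.all (fun d => decide (-3 ≤ d ∧ d ≤ -1))
  then 1 else 0

-- ===== PRECONDITION & SPEC =====
def Spec_safe (l : List Int) (out : Int) : Prop := out = safe_alt l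
instance (l : List Int) (out : Int) : Decidable (Spec_safe l out) := by unfold Spec_safe; infer_instance

-- ===== CLAIM (what is proved, stated in full; the proofs are below) =====
def Claim_equal_safe : Prop := ∀ (l : List Int), Dom_safe l → Spec_safe l (safe l)

-- ===== LEMMAS AND PROOFS =====

-- all adjacent differences l[k+1]-l[k] lie in [1,3] / in [-3,-1]
def AdjP (l : List Int) : Prop := ∀ (k : Nat) (h : k + 1 < l.length), 1 ≤ l[k+1] - l[k] ∧ l[k+1] - l[k] ≤ 3
def AdjN (l : List Int) : Prop := ∀ (k : Nat) (h : k + 1 < l.length), -3 ≤ l[k+1] - l[k] ∧ l[k+1] - l[k] ≤ -1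

-- the loop body's bad-pair test, and its restatement over natural indices
def LoopBad (l : List Int) (i : Int) : Prop :=
  |PySem.List.pyGetD l i 0 - PySem.List.pyGetD l (i + 1) 0| < 1 ∨
    |PySem.List.pyGetD l i 0 - PySem.List.pyGetD l (i + 1) 0| > 3

def AdjAbs (l : List Int) : Prop :=
  ∀ (k : Nat) (h : k + 1 < l.length), 1 ≤ |l[k] - l[k+1]| ∧ |l[k] - l[k+1]| ≤ 3

theorem all_diffs_iff (p : Int → Bool) (l : List Int) :
    ((l.zip (l.drop 1)).map (fun q => q.2 - q.1)).all p = true ↔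
      ∀ (k : Nat) (h : k + 1 < l.length), p (l[k+1] - l[k]) := by
  rw [List.all_eq_true]
  constructor
  · intro h k hk
    have hlen : k < (l.zip (l.drop 1)).length := by
      simp only [List.length_zip, List.length_drop]; omega
    have hmem : ((l.zip (l.drop 1))[k].2 - (l.zip (l.drop 1))[k].1) ∈
        (l.zip (l.drop 1)).map (fun q => q.2 - q.1) :=
      List.mem_map.mpr ⟨_, (l.zip (l.drop 1)).getElem_mem hlen, rfl⟩
    have := h _ hmem
    simpa [List.getElem_zip, List.getElem_drop, Nat.add_comm] using this
  · intro h x hx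
    obtain ⟨q, hq, rfl⟩ := List.mem_map.mp hx
    obtain ⟨k, hk, rfl⟩ := List.getElem_of_mem hq
    have hk' : k + 1 < l.length := by
      simp only [List.length_zip, List.length_drop] at hk; omega
    simpa [List.getElem_zip, List.getElem_drop, Nat.add_comm] using h k hk'

theorem safe_alt_one (l : List Int) (h : AdjP l ∨ AdjN l) : safe_alt l = 1 := by
  unfold safe_alt
  rw [if_pos]
  rcases h with h | h
  · have h1 : ((l.zip (l.drop 1)).map (fun q => q.2 - q.1)).all (fun d => decide (1 ≤ d ∧ d ≤ 3)) = true :=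
      (all_diffs_iff _ l).mpr (fun k hk => decide_eq_true (h k hk))
    rw [h1, Bool.true_or]
  · have h1 : ((l.zip (l.drop 1)).map (fun q => q.2 - q.1)).all (fun d => decide (-3 ≤ d ∧ d ≤ -1)) = true :=
      (all_diffs_iff _ l).mpr (fun k hk => decide_eq_true (h k hk))
    rw [h1, Bool.or_true]

theorem safe_alt_zero (l : List Int) (h : ¬(AdjP l ∨ AdjN l)) : safe_alt l = 0 := by
  unfold safe_alt
  rw [if_neg]
  intro hc
  rcases Bool.or_eq_true_iff.mp hc with h1 | h1
  · exact h (Or.inl (fun k hk => of_decide_eq_true ((all_diffs_iff _ l).mp h1 k hk)))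
  · exact h (Or.inr (fun k hk => of_decide_eq_true ((all_diffs_iff _ l).mp h1 k hk)))

theorem safeLoop_one (l : List Int) (idxs : List Int) (h : ∀ i ∈ idxs, ¬ LoopBad l i) :
    safeLoop l idxs = 1 := by
  induction idxs with
  | nil => rfl
  | cons i rest ih =>
    simp only [safeLoop]
    simp only [LoopBad] at h
    rw [if_neg (h i List.mem_cons_self), ih (fun j hj => h j (List.mem_cons_of_mem _ hj))]

theorem safeLoop_zero (l : List Int) (idxs : List Int) (h : ¬ ∀ i ∈ idxs, ¬ LoopBad l i) :
    safeLoop l idxs = 0 := by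
  induction idxs with
  | nil => exact absurd (by simp) h
  | cons i rest ih =>
    simp only [safeLoop]
    by_cases hi : LoopBad l i
    · rw [if_pos (by simpa [LoopBad] using hi)]
    · rw [if_neg (by simpa [LoopBad] using hi)]
      exact ih (fun hall => h (List.forall_mem_cons.mpr ⟨hi, hall⟩))

theorem loop_cond_iff (l : List Int) :
    (∀ i ∈ PySem.List.pyRange 0 ((l.length : Int) - 1) 1, ¬ LoopBad l i) ↔ AdjAbs l := by
  constructor
  · intro h k hk
    have hik : (k : Int) ∈ PySem.List.pyRange 0 ((l.length : Int) - 1) 1 := by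
      rw [PySem.List.mem_pyRange_one]; omega
    have := h _ hik
    unfold LoopBad at this
    rw [PySem.List.pyGetD_eq_getElem l 0 (by omega) (by omega),
        PySem.List.pyGetD_eq_getElem l 0 (by omega) (by omega)] at this
    simp only [show ((k : Int) + 1).toNat = k + 1 from by omega, Int.toNat_natCast] at this
    omega
  · intro h i hi
    rw [PySem.List.mem_pyRange_one] at hi
    obtain ⟨h0, h1⟩ := hi
    have hk : i.toNat + 1 < l.length := by omega
    have hyp := h i.toNat hk
    unfold LoopBad
    rw [PySem.List.pyGetD_eq_getElem l 0 h0 (by omega),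
        PySem.List.pyGetD_eq_getElem l 0 (by omega) (by omega)]
    simp only [show (i + 1).toNat = i.toNat + 1 from by omega]
    omega

theorem pairwise_le_iff (l : List Int) :
    l.Pairwise (· ≤ ·) ↔ ∀ (k : Nat) (h : k + 1 < l.length), l[k] ≤ l[k+1] := by
  constructor
  · intro h k hk
    exact List.pairwise_iff_getElem.mp h k (k+1) (by omega) hk (by omega)
  · intro h
    exact List.isChain_iff_pairwise.mp ((@List.isChain_iff_getElem _ (fun a b => a ≤ b) l).mpr h)

theorem pairwise_ge_iff (l : List Int) :
    l.Pairwise (fun a b => b ≤ a) ↔ ∀ (k : Nat) (h : k + 1 < l.length), l[k+1] ≤ l[k] := by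
  constructor
  · intro h k hk
    exact List.pairwise_iff_getElem.mp h k (k+1) (by omega) hk (by omega)
  · intro h
    have tr : Trans (fun a b : Int => b ≤ a) (fun a b : Int => b ≤ a) (fun a b : Int => b ≤ a) :=
      ⟨fun h1 h2 => le_trans h2 h1⟩
    exact (@List.isChain_iff_pairwise _ (fun a b : Int => b ≤ a) l tr).mp
      ((@List.isChain_iff_getElem _ (fun a b : Int => b ≤ a) l).mpr h)

theorem sorted_self_iff (l : List Int) :
    l = PySem.List.sorted l (fun x => x) false ↔ l.Pairwise (· ≤ ·) := by
  constructor
  · intro h; rw [h]; exact PySem.List.sorted_pairwise l _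
  · intro h; exact (PySem.List.sorted_eq_self_of_pairwise l _ h).symm

theorem sorted_rev_self_iff (l : List Int) :
    l = PySem.List.sorted l (fun x => x) true ↔ l.Pairwise (fun a b => b ≤ a) := by
  constructor
  · intro h; rw [h]; exact PySem.List.sorted_pairwise_rev l _
  · intro h; exact (PySem.List.sorted_rev_eq_self_of_pairwise l _ h).symm

theorem main_bridge (l : List Int) :
    ((l.Pairwise (· ≤ ·) ∨ l.Pairwise (fun a b => b ≤ a)) ∧ AdjAbs l) ↔ (AdjP l ∨ AdjN l) := by
  rw [pairwise_le_iff, pairwise_ge_iff]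
  constructor
  · rintro ⟨hmono | hmono, habs⟩
    · left; intro k hk
      have h1 := hmono k hk
      have h2 := habs k hk
      rcases abs_cases (l[k] - l[k+1]) with ⟨he, _⟩ | ⟨he, _⟩ <;> omega
    · right; intro k hk
      have h1 := hmono k hk
      have h2 := habs k hk
      rcases abs_cases (l[k] - l[k+1]) with ⟨he, _⟩ | ⟨he, _⟩ <;> omega
  · rintro (h | h)
    · refine ⟨Or.inl fun k hk => by have := h k hk; omega, fun k hk => ?_⟩
      have := h k hk
      rcases abs_cases (l[k] - l[k+1]) with ⟨he, _⟩ | ⟨he, _⟩ <;> omega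
    · refine ⟨Or.inr fun k hk => by have := h k hk; omega, fun k hk => ?_⟩
      have := h k hk
      rcases abs_cases (l[k] - l[k+1]) with ⟨he, _⟩ | ⟨he, _⟩ <;> omega

theorem safe_one (l : List Int)
    (hs : l.Pairwise (· ≤ ·) ∨ l.Pairwise (fun a b => b ≤ a)) (ha : AdjAbs l) : safe l = 1 := by
  unfold safe
  rw [if_neg, safeLoop_one l _ ((loop_cond_iff l).mpr ha)]
  rintro ⟨h1, h2⟩
  rcases hs with hp | hp
  · exact h1 ((sorted_self_iff l).mpr hp)
  · exact h2 ((sorted_rev_self_iff l).mpr hp)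

theorem safe_zero (l : List Int)
    (h : ¬(((l.Pairwise (· ≤ ·) ∨ l.Pairwise (fun a b => b ≤ a))) ∧ AdjAbs l)) : safe l = 0 := by
  unfold safe
  by_cases hs : l = PySem.List.sorted l (fun x => x) false ∨ l = PySem.List.sorted l (fun x => x) true
  · rw [if_neg (by tauto)]
    have hsp : l.Pairwise (· ≤ ·) ∨ l.Pairwise (fun a b => b ≤ a) := by
      rcases hs with h' | h'
      · exact Or.inl ((sorted_self_iff l).mp h')
      · exact Or.inr ((sorted_rev_self_iff l).mp h')
    have hna : ¬ AdjAbs l := fun ha => h ⟨hsp, ha⟩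
    exact safeLoop_zero l _ (fun hall => hna ((loop_cond_iff l).mp hall))
  · rw [if_pos]
    constructor
    · exact fun hc => hs (Or.inl hc)
    · exact fun hc => hs (Or.inr hc)

-- ===== VERDICT (by name: the statement is the Claim_ definition above) =====
theorem safe_spec : Claim_equal_safe := by
  intro l _
  unfold Spec_safe
  by_cases hc : (l.Pairwise (· ≤ ·) ∨ l.Pairwise (fun a b => b ≤ a)) ∧ AdjAbs l
  · rw [safe_one l hc.1 hc.2, safe_alt_one l ((main_bridge l).mp hc)]
  · rw [safe_zero l hc, safe_alt_zero l (fun hd => hc ((main_bridge l).mpr hd))]
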